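-- pv_equiv track=rewrite | github.com/Anooja-21/Easy-Hire | app.py | meets_qualification
-- ===== SOURCE A (Python) =====
-- QUAL_HIERARCHY = ["10th", "iti", "diploma", "12th", "graduation", "post-graduation", "phd"]
--
-- def meets_qualification(user_qual, exam_quals):
--     """
--     User qualifies if their qualification level >= any required qualification in the exam.
--     Example: user with "diploma" qualifies for exams requiring "10th" or "iti" but NOT "12th" or "graduation".
--     """
--     if not exam_quals:
--         return False
--     try:
--         user_idx = QUAL_HIERARCHY.index(user_qual)
--     except ValueError:
--         user_idx = QUAL_HIERARCHY.index("graduation")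
--
--     for q in exam_quals:
--         try:
--             req_idx = QUAL_HIERARCHY.index(q)
--             if user_idx >= req_idx:
--                 return True
--         except ValueError:
--             continue
--     return False
-- ===== SOURCE B (Python) =====
-- QUAL_HIERARCHY = ["10th", "iti", "diploma", "12th", "graduation", "post-graduation", "phd"]
--
-- def meets_qualification(user_qual, exam_quals):
--     # Walk the hierarchy from the bottom up; the user qualifies as soon as some
--     # level at or below their own is required by the exam. No indices at all.
--     required = set(exam_quals)
--     effective = user_qual if user_qual in QUAL_HIERARCHY else "graduation"
--     for level in QUAL_HIERARCHY:
--         if level in required: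
--             return True
--         if level == effective:
--             return False
--     return False
-- ===== Notes on version B (the rewrite author's own statement) =====
-- stated objective: simpler
-- what changed: B inverts the traversal: instead of scanning exam_quals and comparing hierarchy indices per element like A, it builds set(exam_quals) once and walks the fixed hierarchy bottom-up, returning True on the first level required by the exam and False once it passes the user's (or fallback) level, so no index is ever computed or compared. (the exam list is scanned once to build a set instead of per-hierarchy-element index scans)
import Mathlib
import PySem

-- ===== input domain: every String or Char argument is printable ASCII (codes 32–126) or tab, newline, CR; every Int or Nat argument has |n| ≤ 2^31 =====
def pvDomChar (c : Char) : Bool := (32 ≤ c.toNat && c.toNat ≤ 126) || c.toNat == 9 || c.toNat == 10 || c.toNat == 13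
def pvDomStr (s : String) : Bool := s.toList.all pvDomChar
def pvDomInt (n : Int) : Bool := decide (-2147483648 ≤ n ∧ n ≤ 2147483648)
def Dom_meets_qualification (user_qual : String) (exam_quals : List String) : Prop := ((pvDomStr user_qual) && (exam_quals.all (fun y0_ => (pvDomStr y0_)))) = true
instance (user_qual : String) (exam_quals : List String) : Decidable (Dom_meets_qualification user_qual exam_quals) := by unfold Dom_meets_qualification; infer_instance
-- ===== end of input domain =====

-- B walks the fixed hierarchy bottom-up against set(exam_quals) instead of A's per-element
-- index lookup and comparison over exam_quals; no indices are computed. Objective: simpler.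

def qualHierarchy : List String :=
  ["10th", "iti", "diploma", "12th", "graduation", "post-graduation", "phd"]

-- ===== PORT A =====
-- the for-loop of A: first hit returns True, ValueError (index? = none) continues
def meetsLoop (user_idx : Nat) : List String → Bool
  | [] => false
  | q :: rest =>
    match PySem.List.index? qualHierarchy q with
    | some req_idx => if user_idx ≥ req_idx then true else meetsLoop user_idx rest
    | none => meetsLoop user_idx rest

def meets_qualification (user_qual : String) (exam_quals : List String) : Bool :=
  if exam_quals = [] then false
  else
    -- try: index(user_qual)  except ValueError: index("graduation")
    let user_idx : Nat :=
      match PySem.List.index? qualHierarchy user_qual with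
      | some i => i
      | none => (PySem.List.index? qualHierarchy "graduation").getD 0
    meetsLoop user_idx exam_quals

-- ===== PORT B =====
-- the for-loop of B over the hierarchy: True at the first required level, False at the user's level
def altLoop (required : PySem.Set String) (eff : String) : List String → Bool
  | [] => false
  | level :: rest =>
    if required.contains level then true
    else if level = eff then false
    else altLoop required eff rest

def meets_qualification_alt (user_qual : String) (exam_quals : List String) : Bool :=
  let required : PySem.Set String := PySem.Set.ofList exam_quals
  let effective : String := if qualHierarchy.contains user_qual then user_qual else "graduation"
  altLoop required effective qualHierarchy

-- ===== PRECONDITION & SPEC =====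
def Spec_meets_qualification (user_qual : String) (exam_quals : List String) (out : Bool) : Prop := out = meets_qualification_alt user_qual exam_quals
instance (user_qual : String) (exam_quals : List String) (out : Bool) : Decidable (Spec_meets_qualification user_qual exam_quals out) := by unfold Spec_meets_qualification; infer_instance

-- ===== CLAIM =====
def Claim_equal_meets_qualification : Prop := ∀ (user_qual : String) (exam_quals : List String), Dom_meets_qualification user_qual exam_quals → Spec_meets_qualification user_qual exam_quals (meets_qualification user_qual exam_quals)

-- ===== LEMMAS AND PROOFS =====

-- membership in the first u+1 elements ↔ first index exists and is ≤ u
theorem take_contains_iff_idx {α : Type} [DecidableEq α] (l : List α) (q : α) :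
    ∀ u : Nat, (l.take (u + 1)).contains q =
      (match PySem.List.index? l q with
       | some r => decide (u ≥ r)
       | none => false) := by
  induction l with
  | nil =>
    intro u
    have h : PySem.List.index? ([] : List α) q = none :=
      (PySem.List.index?_eq_none_iff _ _).mpr (by simp)
    rw [h]; simp
  | cons x t ih =>
    intro u
    by_cases hx : x = q
    · subst hx
      rw [PySem.List.index?_cons_self]
      simp
    · rw [PySem.List.index?_cons_of_ne t hx]
      cases u with
      | zero =>
        have hqx : ¬ q = x := fun h' => hx h'.symm
        cases h : PySem.List.index? t q <;> simp [h, hqx]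
      | succ v =>
        have hih := ih v
        rw [List.take_succ_cons, List.contains_cons]
        have hbeq : (q == x) = false := by
          simp only [beq_eq_false_iff_ne]; exact fun h' => hx h'.symm
        rw [hbeq, Bool.false_or, hih]
        cases h : PySem.List.index? t q with
        | none => simp
        | some r =>
          simp only [Option.map_some]
          rw [decide_eq_decide]
          omega

-- B's hierarchy walk equals "some required level among the first idx(eff)+1 levels"
theorem altLoop_eq_take_any (s : PySem.Set String) (eff : String) :
    ∀ H : List String, eff ∈ H →
      altLoop s eff H = (H.take ((PySem.List.index? H eff).getD 0 + 1)).any (fun l => s.contains l) := by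
  intro H
  induction H with
  | nil => intro h; simp at h
  | cons x t ih =>
    intro hmem
    by_cases hx : x = eff
    · subst hx
      rw [PySem.List.index?_cons_self]
      simp [altLoop]
    · have hef : eff ∈ t := by
        rcases List.mem_cons.mp hmem with h | h
        · exact absurd h.symm hx
        · exact h
      rw [PySem.List.index?_cons_of_ne t hx]
      have hs : (PySem.List.index? t eff).isSome :=
        (PySem.List.index?_isSome_iff _ _).mpr hef
      obtain ⟨i, hi⟩ := Option.isSome_iff_exists.mp hs
      rw [hi]
      simp only [Option.map_some, Option.getD_some]
      rw [List.take_succ_cons, List.any_cons]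
      show (if s.contains x then true else if x = eff then false else altLoop s eff t) = _
      rw [ih hef, hi]
      by_cases hc : s.contains x = true <;> simp [hc, hx]

-- the two scans count the same intersection: swap which list is traversed
theorem any_contains_comm {α : Type} [DecidableEq α] (xs ys : List α) :
    xs.any (fun x => ys.contains x) = ys.any (fun y => xs.contains y) := by
  rw [Bool.eq_iff_iff]
  simp only [List.any_eq_true, List.contains_iff_mem]
  exact ⟨fun ⟨a, h1, h2⟩ => ⟨a, h2, h1⟩, fun ⟨a, h1, h2⟩ => ⟨a, h2, h1⟩⟩

theorem set_ofList_contains {α : Type} [DecidableEq α] (xs : List α) (q : α) :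
    (PySem.Set.ofList xs).contains q = xs.contains q := by
  simp [PySem.Set.mem_ofList]

-- A's loop equals the same intersection test
theorem meetsLoop_eq_any (u : Nat) (l : List String) :
    meetsLoop u l = l.any (fun q => (qualHierarchy.take (u + 1)).contains q) := by
  induction l with
  | nil => simp [meetsLoop]
  | cons q rest ih =>
    rw [List.any_cons, ← ih, take_contains_iff_idx qualHierarchy q u]
    show (match PySem.List.index? qualHierarchy q with
          | some req_idx => if u ≥ req_idx then true else meetsLoop u rest
          | none => meetsLoop u rest) = _
    cases h : PySem.List.index? qualHierarchy q with
    | none => simp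
    | some r => by_cases hur : u ≥ r <;> simp [hur]

-- ===== VERDICT =====
theorem meets_qualification_spec : Claim_equal_meets_qualification := by
  intro user_qual exam_quals _
  unfold Spec_meets_qualification meets_qualification meets_qualification_alt
  set eff : String := if qualHierarchy.contains user_qual then user_qual else "graduation" with heff
  have heffmem : eff ∈ qualHierarchy := by
    rw [heff]
    by_cases hm : user_qual ∈ qualHierarchy
    · simp only [List.contains_iff_mem, if_pos hm]; exact hm
    · simp only [List.contains_iff_mem, if_neg hm]; decide
  have hidx :
      (match PySem.List.index? qualHierarchy user_qual with
       | some i => i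
       | none => (PySem.List.index? qualHierarchy "graduation").getD 0) =
      (PySem.List.index? qualHierarchy eff).getD 0 := by
    rw [heff]
    by_cases hm : user_qual ∈ qualHierarchy
    · obtain ⟨i, h⟩ := Option.isSome_iff_exists.mp ((PySem.List.index?_isSome_iff _ _).mpr hm)
      simp only [List.contains_iff_mem, if_pos hm, h, Option.getD_some]
    · have h : PySem.List.index? qualHierarchy user_qual = none :=
        (PySem.List.index?_eq_none_iff _ _).mpr hm
      simp only [List.contains_iff_mem, if_neg hm, h]
  rw [altLoop_eq_take_any _ eff qualHierarchy heffmem]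
  set u : Nat := (PySem.List.index? qualHierarchy eff).getD 0 with hu
  split_ifs with he
  · subst he
    simp
  · rw [hidx, meetsLoop_eq_any]
    rw [any_contains_comm]
    congr 1
    funext l
    rw [set_ofList_contains]
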